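-- pv_equiv track=rewrite | github.com/zaimeali/Data-Structure-and-Algorithms | Python/HackerRank_Interview/problem4.py | num_delete
-- ===== SOURCE A (Python) =====
-- def num_delete(first, second):
--     delete = 0
--     for char in first:
--         if not char in second:
--             delete += 1
--     for char in second:
--         if not char in first:
--             delete += 1
--     return delete
-- ===== SOURCE B (Python) =====
-- def num_delete(first, second):
--     shared = set(first) & set(second)
--     missing = len(first) + len(second)
--     for ch in shared:
--         missing -= first.count(ch) + second.count(ch)
--     return missing
-- ===== Notes on version B (the rewrite author's own statement) =====
-- stated objective: alternative
-- what changed: Replaces the two per-character membership-scan loops with a shared-character set built once plus count arithmetic over the few distinct shared characters: answer = total length minus occurrences of shared characters.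
import Mathlib
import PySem

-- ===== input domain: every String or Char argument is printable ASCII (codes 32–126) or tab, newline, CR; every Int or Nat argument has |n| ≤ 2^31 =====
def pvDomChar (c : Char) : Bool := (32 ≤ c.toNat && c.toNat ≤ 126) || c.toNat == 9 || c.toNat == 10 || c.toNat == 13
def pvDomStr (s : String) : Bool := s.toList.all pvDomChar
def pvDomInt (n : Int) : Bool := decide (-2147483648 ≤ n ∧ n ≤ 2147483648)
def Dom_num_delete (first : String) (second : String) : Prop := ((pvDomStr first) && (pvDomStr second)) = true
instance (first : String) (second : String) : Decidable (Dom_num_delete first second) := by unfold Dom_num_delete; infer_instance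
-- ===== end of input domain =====

-- B replaces A's two membership-scan loops with a shared-character set plus count arithmetic (alternative decomposition).


-- ===== PORT A =====
-- 'char in second' for a one-character string is exactly char membership in second's characters,
-- so it is ported as List.contains on the character list.
def num_delete (first : String) (second : String) : Int :=
  second.toList.foldl
    (fun delete char => if !(first.toList.contains char) then delete + 1 else delete)
    (first.toList.foldl
      (fun delete char => if !(second.toList.contains char) then delete + 1 else delete)
      (0 : Int))

-- ===== PORT B =====
-- shared = set(first) & set(second); missing = len(first)+len(second); for ch in shared: missing -= counts
-- (the fold over the set computes a sum, so it is independent of iteration order)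
def num_delete_alt (first : String) (second : String) : Int :=
  let shared := PySem.Set.inter (PySem.Set.ofList first.toList) (PySem.Set.ofList second.toList)
  shared.foldl
    (fun missing ch => missing - ((first.toList.count ch : Int) + (second.toList.count ch : Int)))
    ((first.toList.length : Int) + (second.toList.length : Int))

-- ===== PRECONDITION & SPEC =====
def Spec_num_delete (first : String) (second : String) (out : Int) : Prop := out = num_delete_alt first second
instance (first : String) (second : String) (out : Int) : Decidable (Spec_num_delete first second out) := by unfold Spec_num_delete; infer_instance

-- ===== CLAIM (what is proved, stated in full; the proofs are below) =====
def Claim_equal_num_delete : Prop := ∀ (first : String) (second : String), Dom_num_delete first second → Spec_num_delete first second (num_delete first second)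

-- ===== LEMMAS AND PROOFS =====

-- folding subtraction = initial value minus the sum of the mapped values
theorem foldl_sub_eq_sum (S : List Char) (g : Char → Int) (a : Int) :
    S.foldl (fun acc ch => acc - g ch) a = a - (S.map g).sum := by
  induction S generalizing a with
  | nil => simp
  | cons b S ih => simp [List.foldl_cons, ih]; ring

-- the 0/1 indicator summed over a duplicate-free list is a membership test
theorem sum_indicator (a : Char) (S : List Char) (h : S.Nodup) :
    (S.map (fun c => if a = c then (1 : Int) else 0)).sum
      = if a ∈ S then 1 else 0 := by
  induction S with
  | nil => simp
  | cons b S ih =>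
    rcases List.nodup_cons.mp h with ⟨hb, hS⟩
    by_cases hab : a = b
    · subst hab; simp [ih hS, hb]
    · simp [ih hS, hab]

-- summing the counts of the (distinct) elements of S over l counts the positions of l whose char is in S
theorem sum_counts (S l : List Char) (h : S.Nodup) :
    (S.map (fun c => (l.count c : Int))).sum
      = (l.countP (fun x => decide (x ∈ S)) : Int) := by
  induction l with
  | nil => simp
  | cons a l ih =>
    have hsplit : (S.map (fun c => ((a :: l).count c : Int))).sum
        = (S.map (fun c => (l.count c : Int))).sum
          + (S.map (fun c => if a = c then (1 : Int) else 0)).sum := by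
      rw [← PySem.List.sum_map_add_int]
      refine congrArg List.sum (List.map_congr_left ?_)
      intro c _
      by_cases hac : a = c
      · subst hac; simp
      · simp [hac]
    rw [hsplit, ih, sum_indicator a S h, List.countP_cons]
    by_cases hm : a ∈ S <;> simp [hm]

-- counting the characters NOT in m is the length minus those in m
theorem countP_not_mem (l m : List Char) :
    (l.countP (fun c => !decide (c ∈ m)) : Int)
      = (l.length : Int) - (l.countP (fun c => decide (c ∈ m)) : Int) := by
  induction l with
  | nil => simp
  | cons a l ih =>
    simp only [List.countP_cons, List.length_cons]
    by_cases hm : a ∈ m <;> simp [hm] <;> push_cast at ih ⊢ <;> omega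

theorem num_delete_spec : Claim_equal_num_delete := by
  intro first second _
  unfold Spec_num_delete num_delete num_delete_alt
  set f := first.toList with hf
  set s := second.toList with hs
  set shared := PySem.Set.inter (PySem.Set.ofList f) (PySem.Set.ofList s) with hshared
  have hnodup : shared.Nodup :=
    PySem.Set.nodup_inter _ _ (PySem.Set.nodup_ofList f)
  have hmem : ∀ c : Char, c ∈ shared ↔ c ∈ f ∧ c ∈ s := by
    intro c
    rw [hshared, PySem.Set.mem_inter]
    simp [PySem.Set.mem_ofList]
  -- A's two loops count the characters missing from the other string
  rw [PySem.List.foldl_if_add_one, PySem.List.foldl_if_add_one]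
  -- B's loop subtracts the sum of counts of shared characters
  rw [foldl_sub_eq_sum]
  have hsplit : (shared.map
      (fun ch => (f.count ch : Int) + (s.count ch : Int))).sum
      = (shared.map (fun c => (f.count c : Int))).sum
        + (shared.map (fun c => (s.count c : Int))).sum := by
    rw [← PySem.List.sum_map_add_int]
  rw [hsplit, sum_counts shared f hnodup, sum_counts shared s hnodup]
  -- normalise the membership tests of A's loops and relate shared-membership to the other string
  have hcf : f.countP (fun c => !s.contains c) = f.countP (fun c => !decide (c ∈ s)) := by
    apply List.countP_congr; intro c _; simp [List.contains_eq_mem]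
  have hcs : s.countP (fun c => !f.contains c) = s.countP (fun c => !decide (c ∈ f)) := by
    apply List.countP_congr; intro c _; simp [List.contains_eq_mem]
  have hgf : f.countP (fun x => decide (x ∈ shared)) = f.countP (fun c => decide (c ∈ s)) := by
    apply List.countP_congr; intro c hc; simp [hmem c, hc]
  have hgs : s.countP (fun x => decide (x ∈ shared)) = s.countP (fun c => decide (c ∈ f)) := by
    apply List.countP_congr; intro c hc; simp [hmem c, hc]
  rw [hcf, hcs, hgf, hgs, countP_not_mem f s, countP_not_mem s f]
  ring
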